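-- pv_equiv track=rewrite | github.com/miliar/Code_Jam_Webscraper | solutions_python/Problem_201/206.py | _solve
-- ===== SOURCE A (Python) =====
-- def _solve(a,b,n,target,start,adjust_mask):
--     if n*2 > target:
--
--         adjust = adjust_mask % n
--         if adjust > 0 and ((target - n) >= adjust):
--             if b>a:
--                 b -= 1
--             else:
--                 a-= 1
--
--         if a < 0:
--             a = 0
--         if b < 0:
--             b = 0
--
--         return(a,b)
--
--     if b % 2 == 1:
--         return _solve(a//2,(b-1)//2,n*2, target, start, adjust_mask)
--     else:
--         return _solve((a-1)//2,b//2,n*2, target, start, adjust_mask)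
-- ===== SOURCE B (Python) =====
-- def _solve(a, b, n, target, start, adjust_mask):
--     # iterative bit-halving instead of recursion
--     while n * 2 <= target:
--         if b % 2 == 1:
--             a, b = a // 2, (b - 1) // 2
--         else:
--             a, b = (a - 1) // 2, b // 2
--         n *= 2
--     adjust = adjust_mask % n
--     if adjust > 0 and target - n >= adjust:
--         if b > a:
--             b -= 1
--         else:
--             a -= 1
--     return (max(a, 0), max(b, 0))
-- ===== Notes on version B (the rewrite author's own statement) =====
-- stated objective: simpler
-- what changed: Replaces the tail recursion by an in-place while loop over (a,b,n) and the final if-clamps by max(.,0); same floor divisions and adjust logic. Pre_ excludes only inputs where A raises ZeroDivisionError (n=0 reaching the base case) or recurses forever (n<=0 with n*2<=target).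
import Mathlib
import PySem

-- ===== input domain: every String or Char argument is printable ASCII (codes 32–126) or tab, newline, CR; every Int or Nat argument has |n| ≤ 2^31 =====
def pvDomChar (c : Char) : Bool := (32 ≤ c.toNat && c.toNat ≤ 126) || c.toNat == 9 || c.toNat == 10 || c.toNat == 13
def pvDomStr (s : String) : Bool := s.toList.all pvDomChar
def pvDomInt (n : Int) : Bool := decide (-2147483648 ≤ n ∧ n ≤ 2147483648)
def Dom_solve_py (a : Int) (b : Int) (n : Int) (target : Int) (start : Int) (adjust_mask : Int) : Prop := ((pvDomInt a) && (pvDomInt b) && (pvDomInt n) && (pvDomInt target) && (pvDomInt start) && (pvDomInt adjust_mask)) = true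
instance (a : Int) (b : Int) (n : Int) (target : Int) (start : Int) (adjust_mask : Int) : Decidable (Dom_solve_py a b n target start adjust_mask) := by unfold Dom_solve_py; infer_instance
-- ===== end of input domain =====

-- B replaces A's tail recursion by an iterative while loop over (a,b,n) and the final
-- if-clamps by max(·,0); same floor divisions and adjust logic (objective: simpler).


-- ===== PORT A =====
-- A's base case: adjust, conditional decrement, clamp negatives to 0.
def solveBaseA (a : Int) (b : Int) (n : Int) (target : Int) (adjust_mask : Int) : Int × Int :=
  let adjust := PySem.Int.mod adjust_mask n
  let (a, b) :=
    if adjust > 0 ∧ target - n ≥ adjust then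
      if b > a then (a, b - 1) else (a - 1, b)
    else (a, b)
  let a := if a < 0 then 0 else a
  let b := if b < 0 then 0 else b
  (a, b)

-- A's recursion, with a fuel counter only to make it total in Lean (Pre_ guarantees
-- the fuel 64 is never exhausted on Dom inputs; the guard order is A's).
def solveGoA (fuel : Nat) (a : Int) (b : Int) (n : Int) (target : Int) (start : Int) (adjust_mask : Int) : Int × Int :=
  if n * 2 > target then
    solveBaseA a b n target adjust_mask
  else
    match fuel with
    | 0 => (a, b)  -- unreachable under Pre_
    | fuel + 1 =>
      if PySem.Int.mod b 2 = 1 then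
        solveGoA fuel (PySem.Int.floordiv a 2) (PySem.Int.floordiv (b - 1) 2) (n * 2) target start adjust_mask
      else
        solveGoA fuel (PySem.Int.floordiv (a - 1) 2) (PySem.Int.floordiv b 2) (n * 2) target start adjust_mask

def solve_py (a : Int) (b : Int) (n : Int) (target : Int) (start : Int) (adjust_mask : Int) : Int × Int :=
  solveGoA 64 a b n target start adjust_mask

-- ===== PORT B =====
-- B's while loop: state (a, b, n); fuel only for Lean totality (never exhausted under Pre_).
def solveLoopB (fuel : Nat) (a : Int) (b : Int) (n : Int) (target : Int) : Int × Int × Int :=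
  match fuel with
  | 0 => (a, b, n)  -- unreachable under Pre_
  | fuel + 1 =>
    if n * 2 ≤ target then
      if PySem.Int.mod b 2 = 1 then
        solveLoopB fuel (PySem.Int.floordiv a 2) (PySem.Int.floordiv (b - 1) 2) (n * 2) target
      else
        solveLoopB fuel (PySem.Int.floordiv (a - 1) 2) (PySem.Int.floordiv b 2) (n * 2) target
    else (a, b, n)

def solve_py_alt (a : Int) (b : Int) (n : Int) (target : Int) (start : Int) (adjust_mask : Int) : Int × Int :=
  let (a, b, n) := solveLoopB 64 a b n target
  let adjust := PySem.Int.mod adjust_mask n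
  let (a, b) :=
    if adjust > 0 ∧ target - n ≥ adjust then
      if b > a then (a, b - 1) else (a - 1, b)
    else (a, b)
  (max a 0, max b 0)

-- ===== PRECONDITION & SPEC =====
-- Pre_ excludes exactly the inputs on which the Python A returns no value: n = 0 with
-- n*2 > target raises ZeroDivisionError in 'adjust_mask % n', and n ≤ 0 with
-- n*2 ≤ target recurses forever.
def Pre_solve_py (a : Int) (b : Int) (n : Int) (target : Int) (start : Int) (adjust_mask : Int) : Prop :=
  n ≠ 0 ∧ (1 ≤ n ∨ n * 2 > target)
instance (a : Int) (b : Int) (n : Int) (target : Int) (start : Int) (adjust_mask : Int) : Decidable (Pre_solve_py a b n target start adjust_mask) := by unfold Pre_solve_py; infer_instance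

def pvWitness_solve_py : Int × Int × Int × Int × Int × Int := (3, 5, 1, 10, 0, 6)

def Spec_solve_py (a : Int) (b : Int) (n : Int) (target : Int) (start : Int) (adjust_mask : Int) (out : Int × Int) : Prop := out = solve_py_alt a b n target start adjust_mask
instance (a : Int) (b : Int) (n : Int) (target : Int) (start : Int) (adjust_mask : Int) (out : Int × Int) : Decidable (Spec_solve_py a b n target start adjust_mask out) := by unfold Spec_solve_py; infer_instance

-- ===== CLAIM (what is proved, stated in full; the proofs are below) =====
def Claim_equal_solve_py : Prop := ∀ (a : Int) (b : Int) (n : Int) (target : Int) (start : Int) (adjust_mask : Int), Dom_solve_py a b n target start adjust_mask → Pre_solve_py a b n target start adjust_mask → Spec_solve_py a b n target start adjust_mask (solve_py a b n target start adjust_mask)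

-- ===== LEMMAS AND PROOFS =====

-- The tail applied to B's loop state equals A's base case.
def tailB (s : Int × Int × Int) (target : Int) (adjust_mask : Int) : Int × Int :=
  let (a, b, n) := s
  let adjust := PySem.Int.mod adjust_mask n
  let (a, b) :=
    if adjust > 0 ∧ target - n ≥ adjust then
      if b > a then (a, b - 1) else (a - 1, b)
    else (a, b)
  (max a 0, max b 0)

lemma tail_eq_base (a b n target adjust_mask : Int) :
    tailB (a, b, n) target adjust_mask = solveBaseA a b n target adjust_mask := by
  simp only [tailB, solveBaseA]
  split_ifs with h1 h2 <;> simp <;> constructor <;> omega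

lemma go_eq_loop (fuel : Nat) (a b n target start adjust_mask : Int)
    (h : n * 2 > target ∨ (1 ≤ n ∧ target < 2 ^ fuel * n)) :
    solveGoA fuel a b n target start adjust_mask =
      tailB (solveLoopB fuel a b n target) target adjust_mask := by
  induction fuel generalizing a b n with
  | zero =>
    have hgt : n * 2 > target := by
      rcases h with h | ⟨h1, h2⟩
      · exact h
      · simp at h2; omega
    simp [solveGoA, solveLoopB, hgt, tail_eq_base]
  | succ f ih =>
    by_cases hgt : n * 2 > target
    · rw [solveGoA]
      simp only [hgt, if_pos, solveLoopB]
      rw [if_neg (by omega), tail_eq_base]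
    · have hle : n * 2 ≤ target := by omega
      have hn : 1 ≤ n ∧ target < 2 ^ (f + 1) * n := by
        rcases h with h | h
        · omega
        · exact h
      have hrec : 1 ≤ n * 2 ∧ target < 2 ^ f * (n * 2) := by
        constructor
        · omega
        · have := hn.2
          rw [pow_succ] at this
          linarith
      rw [solveGoA]
      simp only [hgt, if_false]
      rw [solveLoopB]
      simp only [hle, if_pos]
      by_cases hb : PySem.Int.mod b 2 = 1
      · simp only [hb, if_pos]
        exact ih _ _ _ (Or.inr hrec)
      · simp only [hb, if_neg, not_false_iff]
        exact ih _ _ _ (Or.inr hrec)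

-- ===== VERDICT (by name: the statement is the Claim_ definition above) =====
theorem solve_py_spec : Claim_equal_solve_py := by
  intro a b n target start adjust_mask hdom hpre
  unfold Spec_solve_py solve_py solve_py_alt
  have hDom : target ≤ 2147483648 := by
    unfold Dom_solve_py pvDomInt at hdom
    simp at hdom
    omega
  have hfuel : n * 2 > target ∨ (1 ≤ n ∧ target < 2 ^ 64 * n) := by
    rcases hpre.2 with h1 | h2
    · right
      refine ⟨h1, ?_⟩
      have : (2 : Int) ^ 64 * 1 ≤ 2 ^ 64 * n := by
        apply mul_le_mul_of_nonneg_left h1 (by positivity)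
      have h264 : (2147483648 : Int) < 2 ^ 64 := by norm_num
      omega
    · left; exact h2
  rw [go_eq_loop 64 a b n target start adjust_mask hfuel]
  rcases hloop : solveLoopB 64 a b n target with ⟨a', b', n'⟩
  rfl
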